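-- pv_equiv track=rewrite | github.com/syda-ai/syda | syda/templates.py | create_schema_from_placeholders
-- ===== SOURCE A (Python) =====
-- from typing import Dict, List, Optional, Union, Any, Set, Tuple
--
-- def create_schema_from_placeholders(placeholders: Set[str]) -> Dict[str, str]:
--     """
--     Create a data schema from extracted placeholders.
--
--     Args:
--         placeholders: Set of placeholder field names
--
--     Returns:
--         Dictionary mapping field names to field types
--     """
--     schema = {}
--
--     # Map placeholders to likely field types based on field name patterns
--     for field in placeholders:
--         field_lower = field.lower()
--
--         # Map common field names to appropriate types
--         if any(name in field_lower for name in ['name', 'customer', 'client', 'company']):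
--             schema[field] = 'text'
--         elif any(name in field_lower for name in ['email']):
--             schema[field] = 'email'
--         elif any(name in field_lower for name in ['phone', 'mobile', 'fax']):
--             schema[field] = 'phone'
--         elif any(name in field_lower for name in ['address', 'street', 'city', 'state', 'zip', 'postal']):
--             schema[field] = 'address'
--         elif any(name in field_lower for name in ['date', 'time']):
--             schema[field] = 'date'
--         elif any(name in field_lower for name in ['id', 'customer_id', 'client_id', 'account']):
--             schema[field] = 'id'
--         elif any(name in field_lower for name in ['amount', 'price', 'cost', 'fee', 'total']):
--             schema[field] = 'number'
--         else:
--             # Default to text for unknown field types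
--             schema[field] = 'text'
--
--     return schema
-- ===== SOURCE B (Python) =====
-- # Staged-overwrite re-implementation: instead of classifying each field with a
-- # first-match if/elif chain, default every field to 'text' and then sweep the
-- # rules over the whole dict in REVERSE priority order, overwriting matching
-- # fields; the highest-priority matching rule is applied last and so wins.
-- RULES = [
--     (('name', 'customer', 'client', 'company'), 'text'),
--     (('email',), 'email'),
--     (('phone', 'mobile', 'fax'), 'phone'),
--     (('address', 'street', 'city', 'state', 'zip', 'postal'), 'address'),
--     (('date', 'time'), 'date'),
--     (('id', 'customer_id', 'client_id', 'account'), 'id'),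
--     (('amount', 'price', 'cost', 'fee', 'total'), 'number'),
-- ]
--
--
-- def create_schema_from_placeholders(placeholders):
--     schema = dict.fromkeys(placeholders, 'text')
--     for patterns, ftype in reversed(RULES):
--         for field in schema:
--             low = field.lower()
--             if any(p in low for p in patterns):
--                 schema[field] = ftype
--     return schema
-- ===== Notes on version B (the rewrite author's own statement) =====
-- stated objective: alternative
-- what changed: Instead of classifying each field with a field-major first-match if/elif chain, B defaults every field to 'text' and then makes one overwrite pass over the whole dict per rule, sweeping the rules in reverse priority order so the highest-priority matching rule is written last and wins.
import Mathlib
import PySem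

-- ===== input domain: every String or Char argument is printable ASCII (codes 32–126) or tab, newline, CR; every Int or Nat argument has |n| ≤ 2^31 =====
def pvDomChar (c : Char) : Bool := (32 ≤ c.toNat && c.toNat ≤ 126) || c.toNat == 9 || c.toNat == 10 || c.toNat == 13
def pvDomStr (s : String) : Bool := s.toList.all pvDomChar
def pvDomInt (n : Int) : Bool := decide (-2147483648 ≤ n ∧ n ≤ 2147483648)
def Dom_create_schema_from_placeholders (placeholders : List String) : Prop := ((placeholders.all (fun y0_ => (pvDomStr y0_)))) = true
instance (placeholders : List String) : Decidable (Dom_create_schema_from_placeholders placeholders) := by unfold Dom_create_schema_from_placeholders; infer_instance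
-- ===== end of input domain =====

-- B replaces A's per-field first-match if/elif chain by staged overwrite passes:
-- every field defaults to 'text', then each rule, swept in reverse priority order
-- over the whole dict, overwrites its matching fields (objective: alternative).

-- ===== PORT A =====
-- literal transliteration of A's loop with its inline if/elif chain
def pvAGo : List String → PySem.Dict String String → PySem.Dict String String
  | [], schema => schema
  | field :: rest, schema =>
    let field_lower := PySem.Str.lower field
    let schema :=
      if ["name", "customer", "client", "company"].any (fun name => PySem.Str.isIn name field_lower) then
        schema.insert field "text"
      else if ["email"].any (fun name => PySem.Str.isIn name field_lower) then
        schema.insert field "email"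
      else if ["phone", "mobile", "fax"].any (fun name => PySem.Str.isIn name field_lower) then
        schema.insert field "phone"
      else if ["address", "street", "city", "state", "zip", "postal"].any (fun name => PySem.Str.isIn name field_lower) then
        schema.insert field "address"
      else if ["date", "time"].any (fun name => PySem.Str.isIn name field_lower) then
        schema.insert field "date"
      else if ["id", "customer_id", "client_id", "account"].any (fun name => PySem.Str.isIn name field_lower) then
        schema.insert field "id"
      else if ["amount", "price", "cost", "fee", "total"].any (fun name => PySem.Str.isIn name field_lower) then
        schema.insert field "number"
      else
        schema.insert field "text"
    pvAGo rest schema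

def create_schema_from_placeholders (placeholders : List String) : List (String × String) :=
  (pvAGo placeholders PySem.Dict.empty).items

-- ===== PORT B =====
def pvRules : List (List String × String) :=
  [ (["name", "customer", "client", "company"], "text"),
    (["email"], "email"),
    (["phone", "mobile", "fax"], "phone"),
    (["address", "street", "city", "state", "zip", "postal"], "address"),
    (["date", "time"], "date"),
    (["id", "customer_id", "client_id", "account"], "id"),
    (["amount", "price", "cost", "fee", "total"], "number") ]

-- one sweep: 'for field in schema: if any(p in field.lower() for p in patterns): schema[field] = ftype'
def pvSweep (schema : PySem.Dict String String) (rule : List String × String) : PySem.Dict String String :=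
  schema.keys.foldl
    (fun d field =>
      let low := PySem.Str.lower field
      if rule.1.any (fun p => PySem.Str.isIn p low) then d.insert field rule.2 else d)
    schema

def create_schema_from_placeholders_alt (placeholders : List String) : List (String × String) :=
  let schema := placeholders.foldl (fun d f => d.insert f "text") PySem.Dict.empty  -- dict.fromkeys(placeholders, 'text')
  (pvRules.reverse.foldl pvSweep schema).items  -- for patterns, ftype in reversed(RULES): one sweep each

-- ===== PRECONDITION & SPEC =====
def Spec_create_schema_from_placeholders (placeholders : List String) (out : List (String × String)) : Prop := out = create_schema_from_placeholders_alt placeholders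
instance (placeholders : List String) (out : List (String × String)) : Decidable (Spec_create_schema_from_placeholders placeholders out) := by unfold Spec_create_schema_from_placeholders; infer_instance

-- ===== CLAIM (what is proved, stated in full; the proofs are below) =====
def Claim_equal_create_schema_from_placeholders : Prop := ∀ (placeholders : List String), Dom_create_schema_from_placeholders placeholders → Spec_create_schema_from_placeholders placeholders (create_schema_from_placeholders placeholders)

-- ===== LEMMAS AND PROOFS =====

-- proof-side helper: A's if/elif chain as a pure function of the field name
def pvChain (field : String) : String :=
  let field_lower := PySem.Str.lower field
  if ["name", "customer", "client", "company"].any (fun name => PySem.Str.isIn name field_lower) then "text"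
  else if ["email"].any (fun name => PySem.Str.isIn name field_lower) then "email"
  else if ["phone", "mobile", "fax"].any (fun name => PySem.Str.isIn name field_lower) then "phone"
  else if ["address", "street", "city", "state", "zip", "postal"].any (fun name => PySem.Str.isIn name field_lower) then "address"
  else if ["date", "time"].any (fun name => PySem.Str.isIn name field_lower) then "date"
  else if ["id", "customer_id", "client_id", "account"].any (fun name => PySem.Str.isIn name field_lower) then "id"
  else if ["amount", "price", "cost", "fee", "total"].any (fun name => PySem.Str.isIn name field_lower) then "number"
  else "text"

-- A's loop is the insert-the-chain-value fold
theorem pvAGo_eq_foldl (L : List String) (d : PySem.Dict String String) :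
    pvAGo L d = L.foldl (fun d f => d.insert f (pvChain f)) d := by
  induction L generalizing d with
  | nil => simp [pvAGo]
  | cons f rest ih =>
    rw [List.foldl_cons, pvAGo, ih]
    congr 1
    simp only [pvChain]
    split_ifs <;> rfl

-- lookup in a fold of inserts whose value depends only on the key
theorem getD_foldl_insert_fn (g : String → String) (L : List String)
    (d : PySem.Dict String String) (k dflt : String) :
    (L.foldl (fun d f => d.insert f (g f)) d).getD k dflt
      = if k ∈ L then g k else d.getD k dflt := by
  induction L generalizing d with
  | nil => simp
  | cons f rest ih =>
    rw [List.foldl_cons, ih]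
    by_cases hk : k ∈ rest
    · simp [hk]
    · simp [hk, PySem.Dict.getD_insert]
      by_cases hkf : k = f <;> simp [hkf]

-- lookup after one conditional-overwrite pass
theorem getD_foldl_sweep (pats : List String) (t : String) (M : List String)
    (d : PySem.Dict String String) (k dflt : String) :
    (M.foldl (fun d f => let low := PySem.Str.lower f
        if pats.any (fun p => PySem.Str.isIn p low) then d.insert f t else d) d).getD k dflt
      = if k ∈ M ∧ pats.any (fun p => PySem.Str.isIn p (PySem.Str.lower k)) then t
        else d.getD k dflt := by
  induction M generalizing d with
  | nil => simp
  | cons f rest ih =>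
    rw [List.foldl_cons, ih]
    show (if k ∈ rest ∧ (pats.any fun p => PySem.Str.isIn p (PySem.Str.lower k)) = true then t
          else (if (pats.any fun p => PySem.Str.isIn p (PySem.Str.lower f)) = true
                then d.insert f t else d).getD k dflt) = _
    by_cases hcf : (pats.any fun p => PySem.Str.isIn p (PySem.Str.lower f)) = true
    · rw [if_pos hcf, PySem.Dict.getD_insert]
      by_cases hck : (pats.any fun p => PySem.Str.isIn p (PySem.Str.lower k)) = true
      · by_cases hkr : k ∈ rest
        · rw [if_pos ⟨hkr, hck⟩, if_pos ⟨List.mem_cons_of_mem f hkr, hck⟩]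
        · rw [if_neg (fun h => hkr h.1)]
          by_cases hkf : k = f
          · rw [if_pos hkf, if_pos ⟨by simp [hkf], hck⟩]
          · rw [if_neg hkf,
                if_neg (fun h => by rcases List.mem_cons.mp h.1 with h' | h'
                                    exacts [hkf h', hkr h'])]
      · rw [if_neg (fun h => hck h.2)]
        by_cases hkf : k = f
        · exact absurd (hkf.symm ▸ hcf) hck
        · rw [if_neg hkf, if_neg (fun h => hck h.2)]
    · rw [if_neg hcf]
      by_cases hck : (pats.any fun p => PySem.Str.isIn p (PySem.Str.lower k)) = true
      · by_cases hkr : k ∈ rest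
        · rw [if_pos ⟨hkr, hck⟩, if_pos ⟨List.mem_cons_of_mem f hkr, hck⟩]
        · rw [if_neg (fun h => hkr h.1)]
          by_cases hkf : k = f
          · exact absurd (hkf ▸ hck) hcf
          · rw [if_neg (fun h => by rcases List.mem_cons.mp h.1 with h' | h'
                                    exacts [hkf h', hkr h'])]
      · rw [if_neg (fun h => hck h.2), if_neg (fun h => hck h.2)]

-- a conditional-overwrite pass over keys the dict already has keeps the key list
theorem keys_foldl_sweep (pats : List String) (t : String) (M : List String)
    (d : PySem.Dict String String) (h : ∀ f ∈ M, d.contains f = true) :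
    (M.foldl (fun d f => let low := PySem.Str.lower f
        if pats.any (fun p => PySem.Str.isIn p low) then d.insert f t else d) d).keys = d.keys := by
  induction M generalizing d with
  | nil => simp
  | cons f rest ih =>
    rw [List.foldl_cons]
    show (rest.foldl _
        (if (pats.any fun p => PySem.Str.isIn p (PySem.Str.lower f)) = true
         then d.insert f t else d)).keys = d.keys
    by_cases hc : (pats.any fun p => PySem.Str.isIn p (PySem.Str.lower f)) = true
    · rw [if_pos hc,
          ih (d.insert f t) (fun g hg => by
            rw [PySem.Dict.contains_insert]
            simp [h g (by simp [hg])]),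
          PySem.Dict.keys_insert_of_contains d t (h f (by simp))]
    · rw [if_neg hc]
      exact ih d (fun g hg => h g (by simp [hg]))

theorem pvSweep_keys (d : PySem.Dict String String) (r : List String × String) :
    (pvSweep d r).keys = d.keys := by
  unfold pvSweep
  exact keys_foldl_sweep r.1 r.2 d.keys d
    (fun f hf => (PySem.Dict.contains_iff_mem_keys d f).mpr hf)

theorem pvSweep_getD (d : PySem.Dict String String) (r : List String × String) (k dflt : String) :
    (pvSweep d r).getD k dflt
      = if k ∈ d.keys ∧ r.1.any (fun p => PySem.Str.isIn p (PySem.Str.lower k)) then r.2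
        else d.getD k dflt := by
  unfold pvSweep
  exact getD_foldl_sweep r.1 r.2 d.keys d k dflt

-- lookup after all sweeps, for a key of the dict
theorem stages_getD (R : List (List String × String)) (d : PySem.Dict String String)
    (k dflt : String) (hk : k ∈ d.keys) :
    (R.foldl pvSweep d).getD k dflt
      = R.foldl (fun v r => if r.1.any (fun p => PySem.Str.isIn p (PySem.Str.lower k)) then r.2 else v)
          (d.getD k dflt) := by
  induction R generalizing d with
  | nil => simp
  | cons r R ih =>
    rw [List.foldl_cons, List.foldl_cons, ih (pvSweep d r) (by rw [pvSweep_keys]; exact hk)]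
    rw [pvSweep_getD]
    congr 1
    simp [hk]

theorem stages_keys (R : List (List String × String)) (d : PySem.Dict String String) :
    (R.foldl pvSweep d).keys = d.keys := by
  induction R generalizing d with
  | nil => rfl
  | cons r R ih => rw [List.foldl_cons, ih, pvSweep_keys]

-- the reversed sweep fold computes exactly A's first-match chain
theorem revfold_eq_chain (k : String) :
    pvRules.reverse.foldl
        (fun v r => if r.1.any (fun p => PySem.Str.isIn p (PySem.Str.lower k)) then r.2 else v)
        "text" = pvChain k := by
  simp only [pvRules, List.reverse, List.reverseAux, List.foldl_cons, List.foldl_nil, pvChain]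

-- ===== VERDICT =====
theorem create_schema_from_placeholders_spec : Claim_equal_create_schema_from_placeholders := by
  intro L _
  unfold Spec_create_schema_from_placeholders create_schema_from_placeholders create_schema_from_placeholders_alt
  rw [pvAGo_eq_foldl]
  set dA := L.foldl (fun d f => d.insert f (pvChain f)) PySem.Dict.empty with hdA
  set d0 := L.foldl (fun d f => d.insert f "text") PySem.Dict.empty with hd0
  have hkA : dA.keys = PySem.Set.ofList L := by
    rw [hdA, PySem.Dict.keys_foldl_insert]
    simp [PySem.Set.update_nil_left]
  have hk0 : d0.keys = PySem.Set.ofList L := by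
    rw [hd0, PySem.Dict.keys_foldl_insert]
    simp [PySem.Set.update_nil_left]
  have hndA : dA.keys.Nodup := by
    rw [hdA]; exact PySem.Dict.nodup_keys_foldl_insert L _ _ (by simp)
  have hnd0 : d0.keys.Nodup := by
    rw [hd0]; exact PySem.Dict.nodup_keys_foldl_insert L _ _ (by simp)
  have hkB : (pvRules.reverse.foldl pvSweep d0).keys = PySem.Set.ofList L := by
    rw [stages_keys, hk0]
  rw [PySem.Dict.items_eq_map_keys dA hndA "text",
      PySem.Dict.items_eq_map_keys (pvRules.reverse.foldl pvSweep d0)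
        (by rw [stages_keys]; exact hnd0) "text",
      hkA, hkB]
  apply List.map_congr_left
  intro k hkmem
  have hkL : k ∈ L := (PySem.Set.mem_ofList L k).mp hkmem
  have h1 : dA.getD k "text" = pvChain k := by
    rw [hdA, getD_foldl_insert_fn]; simp [hkL]
  have h2 : (pvRules.reverse.foldl pvSweep d0).getD k "text" = pvChain k := by
    rw [stages_getD _ _ _ _ (by rw [hk0]; exact hkmem)]
    have : d0.getD k "text" = "text" := by
      rw [hd0, getD_foldl_insert_fn]; simp
    rw [this, revfold_eq_chain]
  rw [h1, h2]
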